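-- pv_equiv track=rewrite | github.com/981377660LMT/algorithm-study | 11_动态规划/dp分类/线性dp/携程-改变一个数后的最小绝对值差.py | solve
-- ===== SOURCE A (Python) =====
-- from typing import List
--
-- def solve(nums: List[int]) -> int:
--     def calMaxDiff(changedNums: List[int]) -> int:
--         res = 0
--         for pre, cur in zip(changedNums, changedNums[1:]):
--             res = max(res, abs(pre - cur))
--         return res
--
--     n = len(nums)
--     maxDiff, maxIndex = 0, 0
--     for index, (pre, cur) in enumerate(zip(nums, nums[1:])):
--         diff = abs(pre - cur)
--         if diff > maxDiff:
--             maxDiff = diff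
--             maxIndex = index
--
--     if maxIndex == 0:
--         return calMaxDiff(nums[1:])
--     if maxIndex == n - 2:
--         return calMaxDiff(nums[:-1])
--
--     mid1 = (nums[maxIndex - 1] + nums[maxIndex + 1]) // 2
--     nums1 = nums[:maxIndex] + [mid1] + nums[maxIndex + 1 :]
--     res1 = calMaxDiff(nums1)
--     mid2 = (nums[maxIndex] + nums[maxIndex + 2]) // 2
--     nums2 = nums[: maxIndex + 1] + [mid2] + nums[maxIndex + 2 :]
--     res2 = calMaxDiff(nums2)
--     return min(res1, res2)
-- ===== SOURCE B (Python) =====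
-- from typing import List
--
-- def solve(nums: List[int]) -> int:
--     n = len(nums)
--     d = [abs(x - y) for x, y in zip(nums, nums[1:])]
--     if not d:
--         return 0
--     mi = d.index(max(d))
--     if mi == 0:
--         return max(d[1:], default=0)
--     if mi == n - 2:
--         return max(d[:-1], default=0)
--     pre = []
--     run = 0
--     for v in d:
--         run = max(run, v)
--         pre.append(run)
--     suf = []
--     run = 0
--     for v in reversed(d):
--         run = max(run, v)
--         suf.append(run)
--     suf.reverse()
--     m1 = (nums[mi - 1] + nums[mi + 1]) // 2
--     r1 = max(pre[mi - 2] if mi >= 2 else 0, suf[mi + 1],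
--              abs(nums[mi - 1] - m1), abs(m1 - nums[mi + 1]))
--     m2 = (nums[mi] + nums[mi + 2]) // 2
--     r2 = max(pre[mi - 1], suf[mi + 2] if mi + 2 < n - 1 else 0,
--              abs(nums[mi] - m2), abs(m2 - nums[mi + 2]))
--     return min(r1, r2)
-- ===== Notes on version B (the rewrite author's own statement) =====
-- stated objective: alternative
-- what changed: B computes the adjacent-difference array once, finds the first argmax via index(max(d)), and evaluates each of the two midpoint-replacement candidates from prefix/suffix running-max tables plus the two new local diffs, instead of A's rebuilding each candidate list and rescanning all its adjacent differences.
import Mathlib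
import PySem

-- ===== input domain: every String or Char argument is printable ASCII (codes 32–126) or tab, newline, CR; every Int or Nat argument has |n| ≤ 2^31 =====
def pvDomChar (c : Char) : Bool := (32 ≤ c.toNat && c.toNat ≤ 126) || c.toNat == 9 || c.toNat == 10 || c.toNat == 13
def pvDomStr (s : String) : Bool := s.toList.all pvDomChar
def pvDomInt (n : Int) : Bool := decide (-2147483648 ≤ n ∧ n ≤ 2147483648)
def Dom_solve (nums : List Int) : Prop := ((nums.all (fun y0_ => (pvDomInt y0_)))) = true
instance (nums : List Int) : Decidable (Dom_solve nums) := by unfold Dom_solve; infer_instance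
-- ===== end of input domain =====

-- B replaces A's rebuild-and-rescan of the two candidate arrays by segment maxima of the
-- adjacent-difference array (argmax of d, prefix/suffix running-max tables, two new local diffs);
-- objective: alternative decomposition, same asymptotic cost.

-- ===== PORT A =====
-- inner helper calMaxDiff of A
def calMaxDiff (changedNums : List Int) : Int :=
  (changedNums.zip (PySem.List.slice changedNums (some 1) none)).foldl
    (fun res pc => max res (|pc.1 - pc.2|)) 0

def solve (nums : List Int) : Int :=
  let n : Int := nums.length
  let st :=
    (PySem.List.enumerate (nums.zip (PySem.List.slice nums (some 1) none)) 0).foldl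
      (fun (s : Int × Int) ip =>
        let diff := |ip.2.1 - ip.2.2|
        if diff > s.1 then (diff, ip.1) else s) (0, 0)
  let maxIndex := st.2
  if maxIndex = 0 then calMaxDiff (PySem.List.slice nums (some 1) none)
  else if maxIndex = n - 2 then calMaxDiff (PySem.List.slice nums none (some (-1)))
  else
    let mid1 := PySem.Int.floordiv
      (PySem.List.pyGetD nums (maxIndex - 1) 0 + PySem.List.pyGetD nums (maxIndex + 1) 0) 2
    let nums1 := PySem.List.slice nums none (some maxIndex) ++ [mid1] ++
      PySem.List.slice nums (some (maxIndex + 1)) none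
    let res1 := calMaxDiff nums1
    let mid2 := PySem.Int.floordiv
      (PySem.List.pyGetD nums maxIndex 0 + PySem.List.pyGetD nums (maxIndex + 2) 0) 2
    let nums2 := PySem.List.slice nums none (some (maxIndex + 1)) ++ [mid2] ++
      PySem.List.slice nums (some (maxIndex + 2)) none
    let res2 := calMaxDiff nums2
    min res1 res2

-- ===== PORT B =====
def solve_alt (nums : List Int) : Int :=
  let n : Int := nums.length
  let d := (nums.zip (PySem.List.slice nums (some 1) none)).map (fun p => |p.1 - p.2|)
  if d = [] then 0
  else
    let mi : Int :=
      (((PySem.List.index? d ((PySem.List.max? d (fun x => x)).getD 0)).getD 0 : Nat) : Int)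
    if mi = 0 then PySem.List.maxD (PySem.List.slice d (some 1) none) (fun x => x) 0
    else if mi = n - 2 then PySem.List.maxD (PySem.List.slice d none (some (-1))) (fun x => x) 0
    else
      let pre := (d.foldl
        (fun (s : Int × List Int) v => (max s.1 v, s.2 ++ [max s.1 v])) (0, [])).2
      let suf := ((d.reverse.foldl
        (fun (s : Int × List Int) v => (max s.1 v, s.2 ++ [max s.1 v])) (0, [])).2).reverse
      let m1 := PySem.Int.floordiv
        (PySem.List.pyGetD nums (mi - 1) 0 + PySem.List.pyGetD nums (mi + 1) 0) 2
      let r1 := max (max (if 2 ≤ mi then PySem.List.pyGetD pre (mi - 2) 0 else 0)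
                         (PySem.List.pyGetD suf (mi + 1) 0))
                    (max (|PySem.List.pyGetD nums (mi - 1) 0 - m1|)
                         (|m1 - PySem.List.pyGetD nums (mi + 1) 0|))
      let m2 := PySem.Int.floordiv
        (PySem.List.pyGetD nums mi 0 + PySem.List.pyGetD nums (mi + 2) 0) 2
      let r2 := max (max (PySem.List.pyGetD pre (mi - 1) 0)
                         (if mi + 2 < n - 1 then PySem.List.pyGetD suf (mi + 2) 0 else 0))
                    (max (|PySem.List.pyGetD nums mi 0 - m2|)
                         (|m2 - PySem.List.pyGetD nums (mi + 2) 0|))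
      min r1 r2

-- ===== PRECONDITION & SPEC =====
def Spec_solve (nums : List Int) (out : Int) : Prop := out = solve_alt nums
instance (nums : List Int) (out : Int) : Decidable (Spec_solve nums out) := by unfold Spec_solve; infer_instance

-- ===== CLAIM (what is proved, stated in full; the proofs are below) =====
def Claim_equal_solve : Prop := ∀ (nums : List Int), Dom_solve nums → Spec_solve nums (solve nums)

-- ===== LEMMAS AND PROOFS =====

-- adjacent absolute differences of a list (proof-side view of both programs' diff data)
def dl (xs : List Int) : List Int := (xs.zip xs.tail).map (fun p => |p.1 - p.2|)

lemma dl_cons_head (a : Int) (L : List Int) (h : L ≠ []) :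
    dl (a :: L) = |a - L.head h| :: dl L := by
  cases L with
  | nil => simp at h
  | cons b t => rfl

lemma dl_length (xs : List Int) : (dl xs).length = xs.length - 1 := by
  cases xs with
  | nil => rfl
  | cons a t => simp [dl]

lemma dl_nonneg (xs : List Int) : ∀ x ∈ dl xs, 0 ≤ x := by
  intro x hx
  simp only [dl, List.mem_map] at hx
  obtain ⟨p, _, rfl⟩ := hx
  exact abs_nonneg _

lemma foldl_max_max (l : List Int) (a b : Int) :
    l.foldl max (max a b) = max a (l.foldl max b) := by
  induction l generalizing b with
  | nil => rfl
  | cons x t ih =>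
    simp only [List.foldl_cons, max_assoc]
    exact ih (max b x)

lemma M0_nonneg (l : List Int) : 0 ≤ l.foldl max 0 := (PySem.List.le_foldl_max l 0).1

lemma M0_cons (x : Int) (l : List Int) : (x :: l).foldl max 0 = max x (l.foldl max 0) := by
  simp only [List.foldl_cons]
  rw [max_comm (0:Int) x, foldl_max_max]

lemma foldl_max_init (l : List Int) (a : Int) (ha : 0 ≤ a) :
    l.foldl max a = max a (l.foldl max 0) := by
  conv_lhs => rw [← max_eq_left ha]
  exact foldl_max_max l a 0

lemma M0_append (l1 l2 : List Int) :
    (l1 ++ l2).foldl max 0 = max (l1.foldl max 0) (l2.foldl max 0) := by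
  cases l1 with
  | nil => simp [max_eq_right (M0_nonneg l2)]
  | cons x t =>
    simp only [List.cons_append, List.foldl_cons, List.foldl_append]
    exact foldl_max_init l2 _ (le_trans (le_max_left 0 x) (PySem.List.le_foldl_max t (max 0 x)).1)

lemma foldl_max_reverse (l : List Int) (a : Int) : l.reverse.foldl max a = l.foldl max a := by
  induction l generalizing a with
  | nil => rfl
  | cons x t ih =>
    simp only [List.reverse_cons, List.foldl_append, List.foldl_cons, List.foldl_nil, ih]
    rw [max_comm a x, foldl_max_max, max_comm]

lemma enumerate_map {A B : Type} (f : A → B) (l : List A) (s : Int) :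
    PySem.List.enumerate (l.map f) s = (PySem.List.enumerate l s).map (fun p => (p.1, f p.2)) := by
  induction l generalizing s with
  | nil => rfl
  | cons x t ih => simp [PySem.List.enumerate_cons, ih]

-- A's running-argmax loop, characterised: max of the list and first index attaining it
lemma loopA (l : List Int) (s m j : Int) :
    (PySem.List.enumerate l s).foldl
      (fun (st : Int × Int) p => if p.2 > st.1 then (p.2, p.1) else st) (m, j)
    = (l.foldl max m, if m < l.foldl max m then s + (l.idxOf (l.foldl max m) : Int) else j) := by
  induction l generalizing s m j with
  | nil => simp
  | cons x t ih =>
    rw [PySem.List.enumerate_cons]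
    simp only [List.foldl_cons, gt_iff_lt]
    by_cases h : m < x
    · rw [if_pos h, ih]
      have hmx : max m x = x := max_eq_right h.le
      have hxM : x ≤ t.foldl max x := (PySem.List.le_foldl_max t x).1
      simp only [hmx]
      by_cases hx : x < t.foldl max x
      · have hne : x ≠ t.foldl max x := ne_of_lt hx
        rw [if_pos hx, if_pos (lt_of_lt_of_le h hxM), List.idxOf_cons_ne _ hne]
        refine Prod.ext rfl ?_
        push_cast
        ring
      · have hxe : x = t.foldl max x := le_antisymm hxM (not_lt.mp hx)
        rw [if_neg hx, if_pos (lt_of_lt_of_le h hxM), ← hxe, List.idxOf_cons_self]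
        simp
    · rw [if_neg h, ih]
      have hmx : max m x = m := max_eq_left (not_lt.mp h)
      simp only [hmx]
      by_cases hm : m < t.foldl max m
      · have hxm : x ≠ t.foldl max m := ne_of_lt (lt_of_le_of_lt (not_lt.mp h) hm)
        rw [if_pos hm, if_pos hm, List.idxOf_cons_ne _ hxm]
        refine Prod.ext rfl ?_
        push_cast
        ring
      · rw [if_neg hm, if_neg hm]

lemma dl_tail (xs : List Int) : dl xs.tail = (dl xs).tail := by
  cases xs with
  | nil => rfl
  | cons a t =>
    cases t with
    | nil => rfl
    | cons b u => rfl

lemma dl_dropLast (xs : List Int) : dl xs.dropLast = (dl xs).dropLast := by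
  induction xs with
  | nil => rfl
  | cons a t ih =>
    cases t with
    | nil => rfl
    | cons b u =>
      cases u with
      | nil => rfl
      | cons c v =>
        have h1 : (a :: b :: c :: v).dropLast = a :: (b :: c :: v).dropLast := rfl
        rw [h1, dl_cons_head a _ (by simp), dl_cons_head a (b :: c :: v) (by simp), ih]
        have h2 : dl (b :: c :: v) = |b - c| :: dl (c :: v) := rfl
        simp [h2]

lemma dl_patch (xs : List Int) (k : Nat) (m : Int) (h1 : 1 ≤ k) (h2 : k + 1 < xs.length) :
    dl (xs.take k ++ m :: xs.drop (k + 1)) =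
      (dl xs).take (k - 1) ++
        |xs[k - 1]'(by omega) - m| :: |m - xs[k + 1]'h2| :: (dl xs).drop (k + 1) := by
  induction k generalizing xs with
  | zero => omega
  | succ k ihk =>
    cases k with
    | zero =>
      match xs, h2 with
      | a :: b :: c :: t, _ => simp [dl]
    | succ k' =>
      match xs, h2 with
      | a :: ys, h2 =>
        have hys : ys ≠ [] := by
          intro h; rw [h] at h2; simp at h2
        have hlen : k' + 1 + 1 < ys.length := by
          simp at h2; omega
        have htk : (ys.take (k' + 1) ++ m :: ys.drop (k' + 1 + 1)) ≠ [] := by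
          simp
        have hhead : (ys.take (k' + 1) ++ m :: ys.drop (k' + 1 + 1)).head htk
            = ys.head hys := by
          cases ys with
          | nil => simp at hys
          | cons y yt => rfl
        have hstep : (a :: ys).take (k' + 1 + 1) ++ m :: (a :: ys).drop (k' + 1 + 1 + 1)
            = a :: (ys.take (k' + 1) ++ m :: ys.drop (k' + 1 + 1)) := by
          simp [List.take_succ_cons, List.drop_succ_cons]
        rw [hstep, dl_cons_head a _ (by simp), hhead, ihk ys (by omega) hlen,
            dl_cons_head a ys hys]
        have hget0 : ys.head hys = ys[0]'(by omega) := by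
          cases ys with
          | nil => simp at hys
          | cons y yt => rfl
        simp [List.take_succ_cons, List.drop_succ_cons, hget0]

-- the prefix-running-max accumulation loop of B
lemma preLoop (l : List Int) (r : Int) (acc : List Int) :
    l.foldl (fun (s : Int × List Int) v => (max s.1 v, s.2 ++ [max s.1 v])) (r, acc)
    = (l.foldl max r, acc ++ (List.range l.length).map (fun j => (l.take (j + 1)).foldl max r)) := by
  induction l generalizing r acc with
  | nil => simp
  | cons x t ih =>
    simp only [List.foldl_cons]
    rw [ih]
    simp [List.range_succ_eq_map, List.map_map, Function.comp_def, List.take_succ_cons]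

lemma maxD_id_nonneg (l : List Int) (h : ∀ x ∈ l, 0 ≤ x) :
    PySem.List.maxD l (fun x => x) 0 = l.foldl max 0 := by
  cases l with
  | nil => rfl
  | cons x t =>
    rw [PySem.List.maxD, PySem.List.max?_id_cons, Option.getD_some, M0_cons]
    rw [foldl_max_init t x (h x (by simp))]

lemma calMaxDiff_eq (xs : List Int) : calMaxDiff xs = (dl xs).foldl max 0 := by
  rw [calMaxDiff, PySem.List.slice_from_one, dl, List.foldl_map]

-- B's argmax-by-index equals A's loop argmax
lemma mi_eq (d : List Int) (hne : d ≠ []) (hpos : ∀ x ∈ d, 0 ≤ x) :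
    (((PySem.List.index? d ((PySem.List.max? d (fun x => x)).getD 0)).getD 0 : Nat) : Int)
    = if 0 < d.foldl max 0 then (d.idxOf (d.foldl max 0) : Int) else 0 := by
  cases d with
  | nil => simp at hne
  | cons x t =>
    have hx : 0 ≤ x := hpos x (by simp)
    have hMx : t.foldl max x = (x :: t).foldl max 0 := by
      rw [M0_cons, foldl_max_init t x hx]
    rw [PySem.List.index?, PySem.List.max?_id_cons, Option.getD_some, hMx]
    have hmem : (x :: t).foldl max 0 ∈ x :: t := by
      rcases PySem.List.foldl_max_mem t x with h | h
      · rw [← hMx, h]; exact List.mem_cons_self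
      · rw [← hMx]; exact List.mem_cons_of_mem _ h
    obtain ⟨k, hk⟩ := Option.isSome_iff_exists.mp (List.isSome_idxOf?.mpr hmem)
    have hidx : List.idxOf ((x :: t).foldl max 0) (x :: t) = k := by
      rw [List.idxOf_eq_getD_idxOf?, hk]; rfl
    rw [hk, Option.getD_some, ← hidx]
    by_cases hp : 0 < (x :: t).foldl max 0
    · rw [if_pos hp]
    · rw [if_neg hp]
      have h0 : (x :: t).foldl max 0 = 0 := le_antisymm (not_lt.mp hp) (M0_nonneg _)
      have hxle : x ≤ (x :: t).foldl max 0 := by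
        rw [← hMx]; exact (PySem.List.le_foldl_max t x).1
      have hx0 : x = (x :: t).foldl max 0 := by omega
      rw [← hx0, List.idxOf_cons_self]
      rfl

lemma branch1 (nums : List Int) :
    calMaxDiff (PySem.List.slice nums (some 1) none)
    = PySem.List.maxD (PySem.List.slice (dl nums) (some 1) none) (fun x => x) 0 := by
  rw [PySem.List.slice_from_one, PySem.List.slice_from_one, calMaxDiff_eq, dl_tail]
  rw [maxD_id_nonneg _ (fun x hx => dl_nonneg nums x (List.mem_of_mem_tail hx))]

lemma branch2 (nums : List Int) :
    calMaxDiff (PySem.List.slice nums none (some (-1)))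
    = PySem.List.maxD (PySem.List.slice (dl nums) none (some (-1))) (fun x => x) 0 := by
  rw [PySem.List.slice_to_neg_one, PySem.List.slice_to_neg_one, calMaxDiff_eq, dl_dropLast]
  rw [maxD_id_nonneg _ (fun x hx => dl_nonneg nums x (List.mem_of_mem_dropLast hx))]

-- B's prefix-max table lookup
lemma pre_get (d : List Int) (j : Nat) (hj : j < d.length) :
    ((d.foldl (fun (s : Int × List Int) v => (max s.1 v, s.2 ++ [max s.1 v])) (0, [])).2).getD j 0
    = (d.take (j + 1)).foldl max 0 := by
  rw [preLoop]
  have h2 : j < ((List.range d.length).map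
      (fun j => (d.take (j + 1)).foldl max 0)).length := by simpa using hj
  simp only [List.nil_append]
  rw [List.getD_eq_getElem _ _ h2, List.getElem_map, List.getElem_range]

-- B's suffix-max table lookup
lemma suf_get (d : List Int) (j : Nat) (hj : j < d.length) :
    (((d.reverse.foldl (fun (s : Int × List Int) v => (max s.1 v, s.2 ++ [max s.1 v])) (0, [])).2).reverse).getD j 0
    = (d.drop j).foldl max 0 := by
  rw [preLoop]
  simp only [List.nil_append, List.length_reverse]
  have h2 : j < (((List.range d.length).map
      (fun j => (d.reverse.take (j + 1)).foldl max 0)).reverse).length := by simpa using hj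
  rw [List.getD_eq_getElem _ _ h2, List.getElem_reverse, List.getElem_map, List.getElem_range]
  simp only [List.length_map, List.length_range]
  rw [show d.length - 1 - j + 1 = d.length - j from by omega, ← List.reverse_drop,
      foldl_max_reverse]

lemma final_ac (P1 S1 a1 b1 P2 S2 a2 b2 : Int) :
    min (max P1 (max a1 (max b1 S1))) (max P2 (max a2 (max b2 S2)))
    = min (max (max P1 S1) (max a1 b1)) (max (max P2 S2) (max a2 b2)) := by
  simp [max_comm, max_left_comm]

lemma solve_eq_main (nums : List Int) (hlen : 2 ≤ nums.length) : solve nums = solve_alt nums := by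
  have hdlen : (dl nums).length = nums.length - 1 := dl_length nums
  have hdne : dl nums ≠ [] := by
    intro h
    rw [h] at hdlen
    simp at hdlen
    omega
  have hdmap : (nums.zip (PySem.List.slice nums (some 1) none)).map (fun p => |p.1 - p.2|)
      = dl nums := by
    rw [PySem.List.slice_from_one]; rfl
  have hloop : (PySem.List.enumerate (nums.zip (PySem.List.slice nums (some 1) none)) 0).foldl
      (fun (s : Int × Int) ip =>
        if |ip.2.1 - ip.2.2| > s.1 then (|ip.2.1 - ip.2.2|, ip.1) else s) ((0:Int), (0:Int))
      = ((dl nums).foldl max 0,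
         if 0 < (dl nums).foldl max 0 then ((dl nums).idxOf ((dl nums).foldl max 0) : Int)
         else 0) := by
    rw [PySem.List.slice_from_one]
    have h1 := loopA (dl nums) 0 0 0
    rw [show PySem.List.enumerate (dl nums) 0
        = (PySem.List.enumerate (nums.zip nums.tail) 0).map (fun p => (p.1, |p.2.1 - p.2.2|)) from
        enumerate_map _ _ _, List.foldl_map] at h1
    simpa using h1
  simp only [solve, solve_alt]
  rw [hdmap, if_neg hdne, hloop, mi_eq (dl nums) hdne (dl_nonneg nums)]
  set M := (dl nums).foldl max 0 with hM
  set I : Int := if 0 < M then ((dl nums).idxOf M : Int) else 0 with hI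
  simp only
  by_cases hI0 : I = 0
  · rw [if_pos hI0, if_pos hI0]
    exact branch1 nums
  · rw [if_neg hI0, if_neg hI0]
    by_cases hI2 : I = (nums.length : Int) - 2
    · rw [if_pos hI2, if_pos hI2]
      exact branch2 nums
    · rw [if_neg hI2, if_neg hI2]
      have hMpos : 0 < M := by
        by_contra h
        exact hI0 (by rw [hI, if_neg h])
      have hMmem : M ∈ dl nums := by
        rcases PySem.List.foldl_max_mem (dl nums) 0 with h | h
        · rw [hM] at hMpos; omega
        · exact h
      have hIk : I = ((dl nums).idxOf M : Int) := by rw [hI, if_pos hMpos]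
      set k := (dl nums).idxOf M with hk
      have hklt : k < (dl nums).length := List.idxOf_lt_length_of_mem hMmem
      rw [hdlen] at hklt
      have hk1 : 1 ≤ k := by
        rcases Nat.eq_zero_or_pos k with h | h
        · exact absurd (by rw [hIk, h]; rfl) hI0
        · exact h
      have hkne : k ≠ nums.length - 2 := by
        intro h
        apply hI2
        rw [hIk, h]
        omega
      have hkb : k + 2 < nums.length := by omega
      rw [hIk]
      have hguard1 : (if (2:Int) ≤ (k:Int) then
          PySem.List.pyGetD (((dl nums).foldl
            (fun (s : Int × List Int) v => (max s.1 v, s.2 ++ [max s.1 v])) (0, [])).2)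
            ((k:Int) - 2) 0 else 0)
          = ((dl nums).take (k - 1)).foldl max 0 := by
        by_cases hk2 : (2:Int) ≤ (k:Int)
        · rw [if_pos hk2, show ((k:Int) - 2) = ((k - 2 : Nat) : Int) from by omega,
              PySem.List.pyGetD_natCast, pre_get _ _ (by omega),
              show k - 2 + 1 = k - 1 from by omega]
        · rw [if_neg hk2, show k - 1 = 0 from by omega]
          rfl
      have hguard2 : (if (k:Int) + 2 < (nums.length:Int) - 1 then
          PySem.List.pyGetD ((((dl nums).reverse.foldl
            (fun (s : Int × List Int) v => (max s.1 v, s.2 ++ [max s.1 v])) (0, [])).2).reverse)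
            ((k:Int) + 2) 0 else 0)
          = ((dl nums).drop (k + 2)).foldl max 0 := by
        by_cases hc : (k:Int) + 2 < (nums.length:Int) - 1
        · rw [if_pos hc, show ((k:Int) + 2) = ((k + 2 : Nat) : Int) from by omega,
              PySem.List.pyGetD_natCast, suf_get _ _ (by omega)]
        · rw [if_neg hc, show (dl nums).drop (k + 2) = [] from
            List.drop_eq_nil_of_le (by omega)]
          rfl
      rw [hguard1, hguard2]
      rw [show ((k:Int) - 1) = ((k - 1 : Nat) : Int) from by omega,
          show ((k:Int) + 1) = ((k + 1 : Nat) : Int) from by omega,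
          show ((k:Int) + 2) = ((k + 2 : Nat) : Int) from by omega]
      simp only [PySem.List.pyGetD_natCast, PySem.List.slice_to_natCast,
        PySem.List.slice_from_natCast]
      rw [pre_get _ _ (by omega), show k - 1 + 1 = k from by omega]
      rw [suf_get _ _ (by omega)]
      rw [List.getD_eq_getElem nums 0 (show k - 1 < nums.length by omega),
          List.getD_eq_getElem nums 0 (show k < nums.length by omega),
          List.getD_eq_getElem nums 0 (show k + 1 < nums.length by omega),
          List.getD_eq_getElem nums 0 (show k + 2 < nums.length by omega)]
      simp only [List.append_assoc, List.singleton_append, calMaxDiff_eq]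
      rw [dl_patch nums k _ hk1 (by omega), dl_patch nums (k + 1) _ (by omega) (by omega)]
      simp only [Nat.add_sub_cancel, M0_append, M0_cons]
      exact final_ac _ _ _ _ _ _ _ _
-- ===== VERDICT (by name: the statement is the Claim_ definition above) =====
theorem solve_spec : Claim_equal_solve := by
  intro nums _
  show solve nums = solve_alt nums
  match nums with
  | [] => decide
  | [a] => simp [solve, solve_alt, calMaxDiff, PySem.List.slice]
  | a :: b :: t => exact solve_eq_main (a :: b :: t) (by simp)
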